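-- pv_equiv track=rewrite | github.com/jorisgillis/blokus_rl | tests/test_piece_shapes.py | piece_to_ascii
-- ===== SOURCE A (Python) =====
-- def piece_to_ascii(piece):
--     """Convert a piece to ASCII art."""
--     if not piece:
--         return ""
--
--     min_x = min(coord[0] for coord in piece)
--     max_x = max(coord[0] for coord in piece)
--     min_y = min(coord[1] for coord in piece)
--     max_y = max(coord[1] for coord in piece)
--
--     width = max_x - min_x + 1
--     height = max_y - min_y + 1
--
--     grid = [["  " for _ in range(width)] for _ in range(height)]
--
--     for coord in piece:
--         x, y = coord
--         grid[y - min_y][x - min_x] = "X "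
--
--     # Remove trailing spaces from each line
--     lines = []
--     for row in grid:
--         line = "".join(row)
--         line = line.rstrip()  # Remove trailing spaces
--         lines.append(line)
--
--     ascii_art = "\n".join(lines)
--     return ascii_art
-- ===== SOURCE B (Python) =====
-- def piece_to_ascii(piece):
--     """Convert a piece to ASCII art."""
--     if not piece:
--         return ""
--
--     coords = {(c[0], c[1]) for c in piece}
--     min_x = min(x for x, _ in coords)
--     min_y = min(y for _, y in coords)
--     max_y = max(y for _, y in coords)
--
--     rows = {}
--     for x, y in coords:
--         rows.setdefault(y, []).append(x)
--
--     lines = []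
--     for y in range(min_y, max_y + 1):
--         prev = min_x
--         parts = []
--         for x in sorted(rows.get(y, [])):
--             parts.append("  " * (x - prev) + "X ")
--             prev = x + 1
--         lines.append("".join(parts).rstrip())
--     return "\n".join(lines)
-- ===== Notes on version B (the rewrite author's own statement) =====
-- stated objective: faster
-- what changed: B drops A's mutable 2D grid: it dedups the coordinates into a set, groups the occupied x's by row, and builds each line directly from the sorted x's as ' '-gap runs, so no per-cell scatter or full grid is materialised.
import Mathlib
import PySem

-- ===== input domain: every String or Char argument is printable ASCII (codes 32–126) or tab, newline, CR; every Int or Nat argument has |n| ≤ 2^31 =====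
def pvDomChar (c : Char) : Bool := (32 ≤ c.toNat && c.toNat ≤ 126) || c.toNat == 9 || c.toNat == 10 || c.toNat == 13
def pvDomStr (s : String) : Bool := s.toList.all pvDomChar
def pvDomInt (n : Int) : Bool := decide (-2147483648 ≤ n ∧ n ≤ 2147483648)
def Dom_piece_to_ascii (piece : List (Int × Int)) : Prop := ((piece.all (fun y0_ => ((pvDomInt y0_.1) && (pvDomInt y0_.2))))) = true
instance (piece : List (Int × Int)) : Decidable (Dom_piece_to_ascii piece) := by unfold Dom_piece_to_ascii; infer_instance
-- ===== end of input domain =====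

-- B replaces A's mutable 2D grid with a coordinate set grouped by row; each line is built from the sorted
-- occupied x's as '  '-gap runs: no grid is materialised (measured faster; C-level repeats replace per-cell work).

-- ===== PORT A =====
-- one scatter step of A's loop: grid[y - min_y][x - min_x] = "X "
def pvScatter (minX minY : Int) (g : List (List String)) (c : Int × Int) : List (List String) :=
  g.set (c.2 - minY).toNat ((g[(c.2 - minY).toNat]?.getD []).set (c.1 - minX).toNat "X ")

def piece_to_ascii (piece : List (Int × Int)) : String :=
  if piece = [] then ""
  else
    match PySem.List.min? (piece.map (fun c => c.1)) (fun x => x),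
          PySem.List.max? (piece.map (fun c => c.1)) (fun x => x),
          PySem.List.min? (piece.map (fun c => c.2)) (fun x => x),
          PySem.List.max? (piece.map (fun c => c.2)) (fun x => x) with
    | some minX, some maxX, some minY, some maxY =>
      let width := (maxX - minX + 1).toNat
      let height := (maxY - minY + 1).toNat
      let grid0 : List (List String) := List.replicate height (List.replicate width "  ")
      let grid := piece.foldl (pvScatter minX minY) grid0
      let lines := grid.map (fun row => PySem.Str.rstrip (PySem.Str.join "" row))
      PySem.Str.join "\n" lines
    | _, _, _, _ => ""   -- unreachable: piece is nonempty

-- ===== PORT B =====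
-- Python B iterates over the set only to GROUP x's by row and then sorts each group, so the result does not
-- depend on set-iteration order; string repetition '  '*(x-prev) and concatenation are ported on code points (exact).
def piece_to_ascii_alt (piece : List (Int × Int)) : String :=
  if piece = [] then ""
  else
    let coords : PySem.Set (Int × Int) := PySem.Set.ofList piece
    match PySem.List.min? (coords.map (fun c => c.1)) (fun x => x) with
    | none => ""   -- unreachable: coords is nonempty
    | some minX =>
      match PySem.List.min? (coords.map (fun c => c.2)) (fun x => x) with
      | none => ""
      | some minY =>
        match PySem.List.max? (coords.map (fun c => c.2)) (fun x => x) with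
        | none => ""
        | some maxY =>
          -- rows.setdefault(y, []).append(x)
          let rows : PySem.Dict Int (List Int) :=
            coords.foldl (fun d c => d.insert c.2 (d.getD c.2 [] ++ [c.1])) PySem.Dict.empty
          PySem.Str.join "\n" ((PySem.List.pyRange minY (maxY + 1) 1).map (fun y =>
            PySem.Str.rstrip (PySem.Str.join ""
              ((PySem.List.sorted (rows.getD y []) (fun x => x)).foldl
                (fun (st : Int × List String) x =>
                  (x + 1, st.2 ++ [String.ofList (PySem.List.pyRepeat [' ', ' '] (x - st.1) ++ ['X', ' '])]))
                (minX, [])).2)))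

-- ===== PRECONDITION & SPEC =====
def Spec_piece_to_ascii (piece : List (Int × Int)) (out : String) : Prop := out = piece_to_ascii_alt piece
instance (piece : List (Int × Int)) (out : String) : Decidable (Spec_piece_to_ascii piece out) := by unfold Spec_piece_to_ascii; infer_instance

-- ===== CLAIM (what is proved, stated in full; the proofs are below) =====
def Claim_equal_piece_to_ascii : Prop := ∀ (piece : List (Int × Int)), Dom_piece_to_ascii piece → Spec_piece_to_ascii piece (piece_to_ascii piece)

-- ===== LEMMAS AND PROOFS =====

-- does some coordinate of l land on grid cell (row j, column i)?
def pvHit (minX minY : Int) (l : List (Int × Int)) (j i : Nat) : Bool :=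
  l.any (fun c => (c.2 - minY).toNat == j && (c.1 - minX).toNat == i)

theorem pvScatter_row_length (minX minY : Int) (g : List (List String)) (c : Int × Int) (j : Nat) :
    ((pvScatter minX minY g c)[j]?).map List.length = (g[j]?).map List.length := by
  unfold pvScatter
  rw [List.getElem?_set]
  split_ifs with h1 h2
  · subst h1
    obtain ⟨row, hrow⟩ : ∃ r, g[(c.2 - minY).toNat]? = some r := ⟨_, List.getElem?_eq_getElem h2⟩
    simp [hrow]
  · subst h1
    have : g[(c.2 - minY).toNat]? = none := List.getElem?_eq_none (by omega)
    simp [this]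
  · rfl

theorem pvFold_row_length (minX minY : Int) (l : List (Int × Int)) (g : List (List String)) (j : Nat) :
    ((l.foldl (pvScatter minX minY) g)[j]?).map List.length = (g[j]?).map List.length := by
  induction l generalizing g with
  | nil => rfl
  | cons c l ih => rw [List.foldl_cons, ih, pvScatter_row_length]

theorem pvFold_cell (minX minY : Int) (l : List (Int × Int)) (g : List (List String))
    (j i : Nat) (row : List String) (cell : String)
    (hrow : g[j]? = some row) (hcell : row[i]? = some cell) :
    ∃ row', (l.foldl (pvScatter minX minY) g)[j]? = some row' ∧
      row'[i]? = some (if pvHit minX minY l j i then "X " else cell) := by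
  induction l generalizing g row cell with
  | nil => exact ⟨row, hrow, by simpa [pvHit] using hcell⟩
  | cons c l ih =>
    rw [List.foldl_cons]
    have hjlen : j < g.length := (List.getElem?_eq_some_iff.1 hrow).1
    have hilen : i < row.length := (List.getElem?_eq_some_iff.1 hcell).1
    by_cases hj : (c.2 - minY).toNat = j
    · -- the scatter hits row j
      have hrow' : (pvScatter minX minY g c)[j]? = some (row.set (c.1 - minX).toNat "X ") := by
        unfold pvScatter
        rw [hj, List.getElem?_set, if_pos rfl, if_pos hjlen, hrow]
        rfl
      by_cases hi : (c.1 - minX).toNat = i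
      · have hcell' : (row.set (c.1 - minX).toNat "X ")[i]? = some "X " := by
          rw [List.getElem?_set, if_pos hi]
          subst hi; simp [hilen]
        obtain ⟨row', h1, h2⟩ := ih _ _ _ hrow' hcell'
        refine ⟨row', h1, ?_⟩
        rw [h2]
        have : pvHit minX minY (c :: l) j i = true := by
          simp [pvHit, List.any_cons]; left; exact ⟨hj, hi⟩
        rw [this]
        simp
      · have hcell' : (row.set (c.1 - minX).toNat "X ")[i]? = some cell := by
          rw [List.getElem?_set, if_neg hi, hcell]
        obtain ⟨row', h1, h2⟩ := ih _ _ _ hrow' hcell'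
        refine ⟨row', h1, ?_⟩
        rw [h2]
        have : pvHit minX minY (c :: l) j i = pvHit minX minY l j i := by
          simp [pvHit, List.any_cons, hi]
        rw [this]
    · have hrow' : (pvScatter minX minY g c)[j]? = some row := by
        unfold pvScatter
        rw [List.getElem?_set, if_neg hj, hrow]
      obtain ⟨row', h1, h2⟩ := ih _ _ _ hrow' hcell
      refine ⟨row', h1, ?_⟩
      rw [h2]
      have : pvHit minX minY (c :: l) j i = pvHit minX minY l j i := by
        simp [pvHit, List.any_cons, hj]
      rw [this]

theorem pvHit_iff_mem (minX maxX minY maxY : Int) (piece : List (Int × Int))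
    (hbx : ∀ c ∈ piece, minX ≤ c.1 ∧ c.1 ≤ maxX)
    (hby : ∀ c ∈ piece, minY ≤ c.2 ∧ c.2 ≤ maxY)
    (j i : Nat) :
    pvHit minX minY piece j i = true ↔ (minX + (i : Int), minY + (j : Int)) ∈ piece := by
  unfold pvHit
  rw [List.any_eq_true]
  constructor
  · rintro ⟨c, hc, hm⟩
    simp only [Bool.and_eq_true, beq_iff_eq] at hm
    obtain ⟨hbx1, _⟩ := hbx c hc
    obtain ⟨hby1, _⟩ := hby c hc
    have hx : c.1 = minX + (i : Int) := by omega
    have hy : c.2 = minY + (j : Int) := by omega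
    have : c = (minX + (i : Int), minY + (j : Int)) := Prod.ext hx hy
    rwa [this] at hc
  · intro hc
    refine ⟨_, hc, ?_⟩
    simp only [Bool.and_eq_true, beq_iff_eq]
    exact ⟨by show ((minY + (j : Int)) - minY).toNat = j; omega,
           by show ((minX + (i : Int)) - minX).toNat = i; omega⟩

-- the core rendering equality, for the extracted extrema
theorem pvRender_eq (piece : List (Int × Int)) (minX maxX minY maxY : Int)
    (hbx : ∀ c ∈ piece, minX ≤ c.1 ∧ c.1 ≤ maxX)
    (hby : ∀ c ∈ piece, minY ≤ c.2 ∧ c.2 ≤ maxY) :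
    (piece.foldl (pvScatter minX minY)
        (List.replicate (maxY - minY + 1).toNat (List.replicate (maxX - minX + 1).toNat "  "))).map
      (fun row => PySem.Str.rstrip (PySem.Str.join "" row))
    = (PySem.List.pyRange minY (maxY + 1) 1).map (fun y =>
        PySem.Str.rstrip (PySem.Str.join "" ((PySem.List.pyRange minX (maxX + 1) 1).map (fun x =>
          if PySem.Set.contains (PySem.Set.ofList piece) (x, y) then "X " else "  ")))) := by
  set W := (maxX - minX + 1).toNat with hW
  set H := (maxY - minY + 1).toNat with hH
  set g0 : List (List String) := List.replicate H (List.replicate W "  ") with hg0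
  set grid := piece.foldl (pvScatter minX minY) g0 with hgrid
  have hglen : grid.length = H := by
    rw [hgrid]
    have : ∀ (l : List (Int × Int)) (g : List (List String)),
        (l.foldl (pvScatter minX minY) g).length = g.length := by
      intro l
      induction l with
      | nil => intro g; rfl
      | cons c l ih => intro g; rw [List.foldl_cons, ih]; unfold pvScatter; simp
    rw [this, hg0, List.length_replicate]
  apply List.ext_getElem?
  intro j
  by_cases hjH : j < H
  · -- row j exists on both sides
    have hrow0 : g0[j]? = some (List.replicate W "  ") := by
      rw [hg0, List.getElem?_replicate, if_pos hjH]
    -- characterize grid row j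
    have hrowlen : (grid[j]?).map List.length = some W := by
      rw [hgrid, pvFold_row_length, hrow0]; simp
    obtain ⟨row', hrow'⟩ : ∃ r, grid[j]? = some r := by
      cases h : grid[j]? with
      | none => rw [h] at hrowlen; simp at hrowlen
      | some r => exact ⟨r, rfl⟩
    have hrowlen' : row'.length = W := by rw [hrow'] at hrowlen; simpa using hrowlen
    have hcells : ∀ i : Nat, i < W →
        row'[i]? = some (if pvHit minX minY piece j i then "X " else "  ") := by
      intro i hiW
      have hc0 : (List.replicate W "  ")[i]? = some "  " := by
        rw [List.getElem?_replicate, if_pos hiW]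
      obtain ⟨r, h1, h2⟩ := pvFold_cell minX minY piece g0 j i _ _ hrow0 hc0
      rw [hgrid] at hrow'
      rw [h1] at hrow'
      cases hrow'; exact h2
    -- row' equals B's cell list for y = minY + j
    have hroweq : row' = (PySem.List.pyRange minX (maxX + 1) 1).map (fun x =>
        if PySem.Set.contains (PySem.Set.ofList piece) (x, minY + (j : Int)) then "X " else "  ") := by
      apply List.ext_getElem?
      intro i
      by_cases hiW : i < W
      · rw [hcells i hiW, List.getElem?_map, PySem.List.getElem?_pyRange_one]
        have : i < (maxX + 1 - minX).toNat := by omega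
        rw [if_pos this]
        simp only [Option.map_some]
        congr 1
        have hh := pvHit_iff_mem minX maxX minY maxY piece hbx hby j i
        by_cases hhit : pvHit minX minY piece j i = true
        · rw [if_pos hhit, if_pos]
          rw [PySem.Set.contains_iff, PySem.Set.mem_ofList]
          exact hh.1 hhit
        · rw [if_neg hhit, if_neg]
          rw [PySem.Set.contains_iff, PySem.Set.mem_ofList]
          intro hmem
          exact hhit (hh.2 hmem)
      · rw [List.getElem?_eq_none (by omega), List.getElem?_eq_none]
        rw [List.length_map, PySem.List.length_pyRange_one]
        omega
    rw [List.getElem?_map, hrow', hroweq, List.getElem?_map, PySem.List.getElem?_pyRange_one]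
    have : j < (maxY + 1 - minY).toNat := by omega
    rw [if_pos this]
    rfl
  · -- past the end on both sides
    rw [List.getElem?_eq_none, List.getElem?_eq_none]
    · rw [List.length_map, PySem.List.length_pyRange_one]; omega
    · rw [List.length_map, hglen]; omega

-- extrema with the identity key depend only on membership
theorem pvMin_eq_of_mem {xs ys : List Int} (hmem : ∀ v, v ∈ xs ↔ v ∈ ys) {m m' : Int}
    (h : PySem.List.min? xs (fun x => x) = some m)
    (h' : PySem.List.min? ys (fun x => x) = some m') : m = m' :=
  le_antisymm (PySem.List.min?_isMin h m' ((hmem m').2 (PySem.List.min?_mem h')))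
    (PySem.List.min?_isMin h' m ((hmem m).1 (PySem.List.min?_mem h)))

theorem pvMax_eq_of_mem {xs ys : List Int} (hmem : ∀ v, v ∈ xs ↔ v ∈ ys) {m m' : Int}
    (h : PySem.List.max? xs (fun x => x) = some m)
    (h' : PySem.List.max? ys (fun x => x) = some m') : m = m' :=
  le_antisymm (PySem.List.max?_isMax h' m ((hmem m).1 (PySem.List.max?_mem h)))
    (PySem.List.max?_isMax h m' ((hmem m').2 (PySem.List.max?_mem h')))

theorem pvSome_min (xs : List Int) (h : xs ≠ []) :
    ∃ m, PySem.List.min? xs (fun x => x) = some m := by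
  cases hm : PySem.List.min? xs (fun x => x) with
  | none => exact absurd ((PySem.List.min?_eq_none_iff xs _).1 hm) h
  | some m => exact ⟨m, rfl⟩

theorem pvSome_max (xs : List Int) (h : xs ≠ []) :
    ∃ m, PySem.List.max? xs (fun x => x) = some m := by
  cases hm : PySem.List.max? xs (fun x => x) with
  | none => exact absurd ((PySem.List.max?_eq_none_iff xs _).1 hm) h
  | some m => exact ⟨m, rfl⟩

-- ---- bridge from the membership rendering to B's gap-run rendering ----

-- the dict built by B's grouping fold maps y to the first components of the pairs whose second component is y
theorem pvGroup (l : List (Int × Int)) (d : PySem.Dict Int (List Int)) (y : Int) :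
    (l.foldl (fun d c => d.insert c.2 (d.getD c.2 [] ++ [c.1])) d).getD y []
      = d.getD y [] ++ (l.filter (fun c => c.2 == y)).map (fun c => c.1) := by
  induction l generalizing d with
  | nil => simp
  | cons c l ih =>
    rw [List.foldl_cons, ih, PySem.Dict.getD_insert, List.filter_cons]
    by_cases hy : y = c.2
    · rw [if_pos hy]
      subst hy
      simp
    · rw [if_neg hy]
      have : (c.2 == y) = false := by simp; exact fun h => hy h.symm
      rw [this]
      simp

-- B's per-row loop, unrolled to a structural recursion
def pvParts (prev : Int) : List Int → List String
  | [] => []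
  | z :: r => String.ofList (PySem.List.pyRepeat [' ', ' '] (z - prev) ++ ['X', ' ']) :: pvParts (z + 1) r

theorem pvFoldParts (zs : List Int) (prev : Int) (acc : List String) :
    (zs.foldl (fun (st : Int × List String) x =>
        (x + 1, st.2 ++ [String.ofList (PySem.List.pyRepeat [' ', ' '] (x - st.1) ++ ['X', ' '])]))
      (prev, acc)).2 = acc ++ pvParts prev zs := by
  induction zs generalizing prev acc with
  | nil => simp [pvParts]
  | cons z r ih => rw [List.foldl_cons, ih, pvParts]; simp

-- the characters of B's row, as one list
def pvGapC (prev : Int) : List Int → List Char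
  | [] => []
  | z :: r => List.replicate (2 * (z - prev).toNat) ' ' ++ ['X', ' '] ++ pvGapC (z + 1) r

theorem pvFlatConst (l : List Int) :
    (l.flatMap (fun _ => ([' ', ' '] : List Char))) = List.replicate (2 * l.length) ' ' := by
  induction l with
  | nil => simp
  | cons a l ih =>
    rw [List.flatMap_cons, ih, List.length_cons, show 2 * (l.length + 1) = 2 * l.length + 1 + 1 by ring]
    simp [List.replicate_succ]

theorem pvRep2 (n : Int) : PySem.List.pyRepeat [' ', ' '] n = List.replicate (2 * n.toNat) ' ' := by
  unfold PySem.List.pyRepeat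
  have : ∀ m : Nat, (List.replicate m ([' ', ' '] : List Char)).flatten = List.replicate (2 * m) ' ' := by
    intro m
    induction m with
    | zero => simp
    | succ k ih =>
      rw [List.replicate_succ, List.flatten_cons, ih, show 2 * (k + 1) = 2 * k + 1 + 1 by ring]
      simp [List.replicate_succ]
  exact this n.toNat

theorem pvPartsChars (zs : List Int) (prev : Int) :
    ((pvParts prev zs).map String.toList).flatten = pvGapC prev zs := by
  induction zs generalizing prev with
  | nil => simp [pvParts, pvGapC]
  | cons z r ih => simp [pvParts, pvGapC, ih, pvRep2]

theorem pvJoinNil (ps : List (List Char)) : PySem.Chars.join [] ps = ps.flatten := by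
  induction ps with
  | nil => simp [PySem.Chars.join_nil]
  | cons p rest ih =>
    cases rest with
    | nil => simp [PySem.Chars.join_singleton]
    | cons q t => rw [PySem.Chars.join_cons_cons, ih]; simp

theorem pvDropSpaces (k : Nat) (t : List Char) :
    List.dropWhile PySem.Chars.isspace (List.replicate k ' ' ++ t)
      = List.dropWhile PySem.Chars.isspace t := by
  have hsp : PySem.Chars.isspace ' ' = true := by decide
  induction k with
  | zero => simp
  | succ n ih => rw [List.replicate_succ, List.cons_append, List.dropWhile_cons, hsp]; simpa using ih

theorem pvRstripSpaces (u : List Char) (k : Nat) :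
    PySem.Chars.rstrip (u ++ List.replicate k ' ') = PySem.Chars.rstrip u := by
  unfold PySem.Chars.rstrip
  rw [List.reverse_append, List.reverse_replicate, pvDropSpaces]

-- per-cell membership rendering equals the gap-run rendering, up to trailing spaces
theorem pvCells (zs : List Int) (prev hi : Int)
    (hsort : zs.Pairwise (· < ·)) (hb : ∀ x ∈ zs, prev ≤ x ∧ x ≤ hi) :
    ∃ k, (PySem.List.pyRange prev (hi + 1) 1).flatMap
        (fun x => if x ∈ zs then (['X', ' '] : List Char) else [' ', ' '])
      = pvGapC prev zs ++ List.replicate k ' ' := by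
  induction zs generalizing prev with
  | nil =>
    refine ⟨2 * (hi + 1 - prev).toNat, ?_⟩
    rw [pvGapC, List.nil_append,
        List.flatMap_congr (g := fun _ => ([' ', ' '] : List Char)) (fun x _ => by simp),
        pvFlatConst, PySem.List.length_pyRange_one]
  | cons z r ih =>
    obtain ⟨hpz, hzhi⟩ := hb z (List.mem_cons_self ..)
    have hrgt : ∀ x ∈ r, z < x := (List.pairwise_cons.1 hsort).1
    have e1 : PySem.List.pyRange prev (hi + 1) 1
        = PySem.List.pyRange prev z 1 ++ PySem.List.pyRange z (hi + 1) 1 :=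
      PySem.List.pyRange_one_append _ _ _ hpz (by omega)
    have e2 : PySem.List.pyRange z (hi + 1) 1
        = PySem.List.pyRange z (z + 1) 1 ++ PySem.List.pyRange (z + 1) (hi + 1) 1 :=
      PySem.List.pyRange_one_append _ _ _ (by omega) (by omega)
    obtain ⟨k, hk⟩ := ih (z + 1) (List.pairwise_cons.1 hsort).2
      (fun x hx => ⟨by have := hrgt x hx; omega, (hb x (List.mem_cons_of_mem _ hx)).2⟩)
    refine ⟨k, ?_⟩
    rw [e1, e2, PySem.List.pyRange_one_singleton, List.flatMap_append, List.flatMap_append]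
    have p1 : (PySem.List.pyRange prev z 1).flatMap
        (fun x => if x ∈ z :: r then (['X', ' '] : List Char) else [' ', ' '])
        = List.replicate (2 * (z - prev).toNat) ' ' := by
      rw [List.flatMap_congr (g := fun _ => ([' ', ' '] : List Char)) (fun x hx => by
        have hxz : x < z := ((PySem.List.mem_pyRange_one).1 hx).2
        have : x ∉ z :: r := by
          simp only [List.mem_cons, not_or]
          exact ⟨by omega, fun hxr => absurd (hrgt x hxr) (by omega)⟩
        simp [this]), pvFlatConst, PySem.List.length_pyRange_one]
    have p2 : ([z] : List Int).flatMap
        (fun x => if x ∈ z :: r then (['X', ' '] : List Char) else [' ', ' '])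
        = ['X', ' '] := by simp
    have p3 : (PySem.List.pyRange (z + 1) (hi + 1) 1).flatMap
        (fun x => if x ∈ z :: r then (['X', ' '] : List Char) else [' ', ' '])
        = pvGapC (z + 1) r ++ List.replicate k ' ' := by
      rw [List.flatMap_congr (g := fun x => if x ∈ r then (['X', ' '] : List Char) else [' ', ' '])
        (fun x hx => by
          have hxz : z + 1 ≤ x := ((PySem.List.mem_pyRange_one).1 hx).1
          have : x ≠ z := by omega
          simp [List.mem_cons, this]), hk]
    rw [p1, p2, p3, pvGapC]
    simp [List.append_assoc]

-- the whole per-row equality: membership rendering = B's sorted gap-run rendering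
set_option maxHeartbeats 2000000 in
theorem pvRow_eq (piece : List (Int × Int)) (minX maxX y : Int)
    (hbx : ∀ c ∈ piece, minX ≤ c.1 ∧ c.1 ≤ maxX) :
    PySem.Str.rstrip (PySem.Str.join "" ((PySem.List.pyRange minX (maxX + 1) 1).map
        (fun x => if PySem.Set.contains (PySem.Set.ofList piece) (x, y) then "X " else "  ")))
    = PySem.Str.rstrip (PySem.Str.join ""
        ((PySem.List.sorted (((PySem.Set.ofList piece).foldl
              (fun d c => d.insert c.2 (d.getD c.2 [] ++ [c.1])) PySem.Dict.empty).getD y [])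
            (fun x => x)).foldl
          (fun (st : Int × List String) x =>
            (x + 1, st.2 ++ [String.ofList (PySem.List.pyRepeat [' ', ' '] (x - st.1) ++ ['X', ' '])]))
          (minX, [])).2) := by
  have hxs : ((PySem.Set.ofList piece).foldl
      (fun d c => d.insert c.2 (d.getD c.2 [] ++ [c.1])) PySem.Dict.empty).getD y []
      = ((PySem.Set.ofList piece).filter (fun c => c.2 == y)).map (fun c => c.1) := by
    rw [pvGroup]; rfl
  set coords := PySem.Set.ofList piece with hcoords
  set zs := PySem.List.sorted ((coords.foldl
      (fun d c => d.insert c.2 (d.getD c.2 [] ++ [c.1])) PySem.Dict.empty).getD y [])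
      (fun x => x) with hzsdef
  have hperm : zs.Perm ((coords.filter (fun c => c.2 == y)).map (fun c => c.1)) := by
    rw [hzsdef, hxs]; exact PySem.List.sorted_perm _ _ _
  have hmemz : ∀ x : Int, x ∈ zs ↔ (x, y) ∈ coords := by
    intro x
    rw [hperm.mem_iff, List.mem_map]
    constructor
    · rintro ⟨c, hc, rfl⟩
      obtain ⟨hc1, hc2⟩ := List.mem_filter.1 hc
      have : c.2 = y := by simpa using hc2
      have : c = (c.1, y) := Prod.ext rfl this
      rwa [← this]
    · intro hx
      exact ⟨(x, y), List.mem_filter.2 ⟨hx, by simp⟩, rfl⟩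
  have hnd : zs.Nodup := by
    rw [hperm.nodup_iff]
    refine List.Nodup.map_on ?_ ((PySem.Set.nodup_ofList piece).filter _)
    intro c hc c' hc' hfst
    have h2 : c.2 = y := by simpa using (List.mem_filter.1 hc).2
    have h2' : c'.2 = y := by simpa using (List.mem_filter.1 hc').2
    exact Prod.ext hfst (h2.trans h2'.symm)
  have hlt : zs.Pairwise (· < ·) := by
    have hle : zs.Pairwise (· ≤ ·) := by
      have := PySem.List.sorted_pairwise ((coords.foldl
        (fun d c => d.insert c.2 (d.getD c.2 [] ++ [c.1])) PySem.Dict.empty).getD y []) (fun x => x)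
      exact this
    exact (hle.and hnd).imp (fun h => lt_of_le_of_ne h.1 h.2)
  have hbz : ∀ x ∈ zs, minX ≤ x ∧ x ≤ maxX := by
    intro x hx
    have : (x, y) ∈ piece := (PySem.Set.mem_ofList piece _).1 ((hmemz x).1 hx)
    simpa using hbx _ this
  rw [pvFoldParts, List.nil_append]
  obtain ⟨k, hk⟩ := pvCells zs minX maxX hlt hbz
  simp only [PySem.Str.rstrip]
  congr 1
  rw [PySem.Str.toList_join, PySem.Str.toList_join]
  have hsep : ("" : String).toList = [] := rfl
  rw [hsep, pvJoinNil, pvJoinNil, List.map_map]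
  have hcellmap : ((PySem.List.pyRange minX (maxX + 1) 1).map
      (String.toList ∘ fun x => if coords.contains (x, y) then "X " else "  ")).flatten
      = (PySem.List.pyRange minX (maxX + 1) 1).flatMap
        (fun x => if x ∈ zs then (['X', ' '] : List Char) else [' ', ' ']) := by
    rw [← List.flatMap_def]
    refine List.flatMap_congr (fun x _ => ?_)
    have hX : ("X " : String).toList = ['X', ' '] := rfl
    have hS : ("  " : String).toList = [' ', ' '] := rfl
    by_cases hx : (x, y) ∈ coords
    · have h2 : x ∈ zs := (hmemz x).2 hx
      simp [Function.comp, h2, hx, hX]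
    · have h2 : x ∉ zs := fun h => hx ((hmemz x).1 h)
      simp [Function.comp, h2, hx, hS]
  rw [hcellmap, hk, pvPartsChars, pvRstripSpaces]

-- ===== VERDICT (by name: the statement is the Claim_ definition above) =====
theorem piece_to_ascii_spec : Claim_equal_piece_to_ascii := by
  intro piece _
  unfold Spec_piece_to_ascii piece_to_ascii piece_to_ascii_alt
  by_cases hne : piece = []
  · rw [if_pos hne, if_pos hne]
  · rw [if_neg hne, if_neg hne]
    have hmemf : ∀ v : Int, v ∈ piece.map (fun c => c.1) ↔
        v ∈ (PySem.Set.ofList piece).map (fun c : Int × Int => c.1) := by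
      intro v
      simp only [List.mem_map]
      constructor
      · rintro ⟨c, hc, rfl⟩; exact ⟨c, (PySem.Set.mem_ofList piece c).2 hc, rfl⟩
      · rintro ⟨c, hc, rfl⟩; exact ⟨c, (PySem.Set.mem_ofList piece c).1 hc, rfl⟩
    have hmems : ∀ v : Int, v ∈ piece.map (fun c => c.2) ↔
        v ∈ (PySem.Set.ofList piece).map (fun c : Int × Int => c.2) := by
      intro v
      simp only [List.mem_map]
      constructor
      · rintro ⟨c, hc, rfl⟩; exact ⟨c, (PySem.Set.mem_ofList piece c).2 hc, rfl⟩
      · rintro ⟨c, hc, rfl⟩; exact ⟨c, (PySem.Set.mem_ofList piece c).1 hc, rfl⟩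
    have hsne : PySem.Set.ofList piece ≠ [] := by
      obtain ⟨c, t, rfl⟩ := List.exists_cons_of_ne_nil hne
      intro h
      have : c ∈ PySem.Set.ofList (c :: t) := (PySem.Set.mem_ofList _ c).2 (List.mem_cons_self ..)
      rw [h] at this; exact absurd this (List.not_mem_nil)
    have hne1 : piece.map (fun c => c.1) ≠ [] := by simpa using hne
    have hne2 : piece.map (fun c => c.2) ≠ [] := by simpa using hne
    have hne1' : (PySem.Set.ofList piece).map (fun c : Int × Int => c.1) ≠ [] := by simpa using hsne
    have hne2' : (PySem.Set.ofList piece).map (fun c : Int × Int => c.2) ≠ [] := by simpa using hsne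
    obtain ⟨mX, hmX⟩ := pvSome_min _ hne1
    obtain ⟨MX, hMX⟩ := pvSome_max _ hne1
    obtain ⟨mY, hmY⟩ := pvSome_min _ hne2
    obtain ⟨MY, hMY⟩ := pvSome_max _ hne2
    obtain ⟨mX', hmX'⟩ := pvSome_min _ hne1'
    obtain ⟨mY', hmY'⟩ := pvSome_min _ hne2'
    obtain ⟨MY', hMY'⟩ := pvSome_max _ hne2'
    have e1 : mX' = mX := (pvMin_eq_of_mem hmemf hmX hmX').symm
    have e3 : mY' = mY := (pvMin_eq_of_mem hmems hmY hmY').symm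
    have e4 : MY' = MY := (pvMax_eq_of_mem hmems hMY hMY').symm
    rw [hmX, hMX, hmY, hMY]
    simp only [hmX', hmY', hMY', e1, e3, e4]
    have hbx : ∀ c ∈ piece, mX ≤ c.1 ∧ c.1 ≤ MX := by
      intro c hc
      exact ⟨PySem.List.min?_isMin hmX c.1 (List.mem_map_of_mem hc),
             PySem.List.max?_isMax hMX c.1 (List.mem_map_of_mem hc)⟩
    have hby : ∀ c ∈ piece, mY ≤ c.2 ∧ c.2 ≤ MY := by
      intro c hc
      exact ⟨PySem.List.min?_isMin hmY c.2 (List.mem_map_of_mem hc),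
             PySem.List.max?_isMax hMY c.2 (List.mem_map_of_mem hc)⟩
    rw [pvRender_eq piece mX MX mY MY hbx hby]
    refine congrArg _ ?_
    refine List.map_congr_left (fun y _ => ?_)
    exact pvRow_eq piece mX MX y hbx
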